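-- pv_equiv track=rewrite | github.com/dev2pew/promptify | src/promptify/core/mods.py | split_git_branch_prefix
-- ===== SOURCE A (Python) =====
-- def split_git_branch_prefix(body: str) -> tuple[str | None, str | None, str] | None:
--     """Split an optional bracketed branch prefix from a Git mention body"""
--     if not body.startswith("["):
--         return None, None, body
--
--     branch_chars: list[str] = []
--     raw_chars: list[str] = []
--     escaped = False
--
--     for index in range(1, len(body)):
--         char = body[index]
--         if escaped:
--             branch_chars.append(char)
--             raw_chars.extend(["\\", char])
--             escaped = False
--             continue
--         if char == "\\":
--             escaped = True
--             continue
--         if char == "]":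
--             if index + 1 >= len(body) or body[index + 1] != ":":
--                 return None
--             return "".join(branch_chars), "".join(raw_chars), body[index + 2 :]
--         branch_chars.append(char)
--         raw_chars.append(char)
--
--     return None
-- ===== SOURCE B (Python) =====
-- def _unescape(raw):
--     out = []
--     i = 0
--     n = len(raw)
--     while i < n:
--         if raw[i] == "\\" and i + 1 < n:
--             out.append(raw[i + 1])
--             i += 2
--         else:
--             out.append(raw[i])
--             i += 1
--     return "".join(out)
--
--
-- def split_git_branch_prefix(body):
--     """Split an optional bracketed branch prefix from a Git mention body"""
--     if not body.startswith("["):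
--         return None, None, body
--     n = len(body)
--     j = 1
--     escaped = False
--     while j < n:
--         c = body[j]
--         if escaped:
--             escaped = False
--         elif c == "\\":
--             escaped = True
--         elif c == "]":
--             break
--         j += 1
--     if j >= n or j + 1 >= n or body[j + 1] != ":":
--         return None
--     raw = body[1:j]
--     return _unescape(raw), raw, body[j + 2:]
-- ===== Notes on version B (the rewrite author's own statement) =====
-- stated objective: simpler
-- what changed: replaced the parallel per-character building of branch and raw with a locate-then-slice decomposition: one scan finds the index of the first non-escaped ']', raw is a direct slice, branch is a separate unescaping pass over raw
import Mathlib
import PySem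

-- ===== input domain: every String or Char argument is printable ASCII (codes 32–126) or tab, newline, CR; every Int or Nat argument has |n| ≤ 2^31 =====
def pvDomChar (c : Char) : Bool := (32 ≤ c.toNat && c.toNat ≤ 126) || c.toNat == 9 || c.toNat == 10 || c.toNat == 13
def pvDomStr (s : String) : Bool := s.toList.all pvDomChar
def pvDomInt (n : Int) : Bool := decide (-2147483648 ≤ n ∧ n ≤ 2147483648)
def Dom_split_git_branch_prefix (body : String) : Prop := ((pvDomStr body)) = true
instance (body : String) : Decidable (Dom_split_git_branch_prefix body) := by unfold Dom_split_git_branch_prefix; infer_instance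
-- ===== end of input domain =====

-- B replaces A's parallel per-character building of branch/raw with locate-then-slice-then-unescape; simpler decomposition, same cost.

-- ===== PORT A =====
-- A's for-loop over range(1, len(body)) carrying (escaped, branch_chars, raw_chars);
-- the remaining characters `rest` stand for body[index:], so body[index+1] is rest's
-- second element and body[index+2:] its tail — exact for these in-range slices.
def goA : List Char → Bool → List Char → List Char → Option (Option String × Option String × String)
  | [], _, _, _ => none
  | c :: rest, escaped, br, raw =>
    if escaped then goA rest false (br ++ [c]) (raw ++ ['\\', c])
    else if c = '\\' then goA rest true br raw
    else if c = ']' then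
      match rest with
      | [] => none
      | d :: rest' => if d = ':' then some (some (String.mk br), some (String.mk raw), String.mk rest') else none
    else goA rest escaped (br ++ [c]) (raw ++ [c])

def split_git_branch_prefix (body : String) : Option (Option String × Option String × String) :=
  match body.toList with
  | '[' :: tail => goA tail false [] []
  | _ => some (none, none, body)

-- ===== PORT B =====
-- B's while loop locating the first non-escaped ']'; index is relative to body[1:],
-- built by mapping +1 over the recursive call (same scan, counter carried structurally).
def locB : List Char → Bool → Option Nat
  | [], _ => none
  | c :: rest, escaped =>
    if escaped then (locB rest false).map (· + 1)
    else if c = '\\' then (locB rest true).map (· + 1)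
    else if c = ']' then some 0
    else (locB rest false).map (· + 1)

-- B's _unescape pass over raw (the `i + 1 < n` guard is the final [c] case).
def unesc : List Char → List Char
  | [] => []
  | c :: rest =>
    if c = '\\' then
      match rest with
      | d :: rest' => d :: unesc rest'
      | [] => [c]
    else c :: unesc rest

-- body of B after the '[' check, over tail = body[1:]; Python's slices body[1:j] and
-- body[j+2:] with 0 ≤ j become take/drop on tail (exact for nonnegative indices).
def bCore (tail : List Char) : Option (Option String × Option String × String) :=
  match locB tail false with
  | none => none
  | some j =>
    if tail[j + 1]? = some ':' then
      some (some (String.mk (unesc (tail.take j))), some (String.mk (tail.take j)), String.mk (tail.drop (j + 2)))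
    else none

def split_git_branch_prefix_alt (body : String) : Option (Option String × Option String × String) :=
  match body.toList with
  | c :: tail => if c = '[' then bCore tail else some (none, none, body)
  | [] => some (none, none, body)

-- ===== PRECONDITION & SPEC =====
def Spec_split_git_branch_prefix (body : String) (out : Option (Option String × Option String × String)) : Prop := out = split_git_branch_prefix_alt body
instance (body : String) (out : Option (Option String × Option String × String)) : Decidable (Spec_split_git_branch_prefix body out) := by unfold Spec_split_git_branch_prefix; infer_instance

-- ===== CLAIM (what is proved, stated in full; the proofs are below) =====
def Claim_equal_split_git_branch_prefix : Prop := ∀ (body : String), Dom_split_git_branch_prefix body → Spec_split_git_branch_prefix body (split_git_branch_prefix body)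

-- ===== LEMMAS AND PROOFS =====

-- reference splitter: spl tail = some (branch, raw, rest) iff tail = raw ++ ']' :: ':' :: rest
-- with the ']' non-escaped, and branch the unescaped raw
def spl : List Char → Option (List Char × List Char × List Char)
  | [] => none
  | c :: rest =>
    if c = '\\' then
      match rest with
      | [] => none
      | d :: rest' => (spl rest').map fun (b, r, t) => (d :: b, '\\' :: d :: r, t)
    else if c = ']' then
      match rest with
      | [] => none
      | d :: t => if d = ':' then some ([], [], t) else none
    else (spl rest).map fun (b, r, t) => (c :: b, c :: r, t)

lemma spl_nil : spl [] = none := by rw [spl.eq_def]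

lemma spl_cons_esc (d : Char) (rest' : List Char) :
    spl ('\\' :: d :: rest') = (spl rest').map fun (b, r, t) => (d :: b, '\\' :: d :: r, t) := by
  rw [spl.eq_def]; simp

lemma spl_esc_nil : spl ['\\'] = none := by rw [spl.eq_def]; simp

lemma spl_cons_close (rest : List Char) :
    spl (']' :: rest) = (match rest with | [] => none | d :: t => if d = ':' then some ([], [], t) else none) := by
  rw [spl.eq_def]; simp

lemma spl_cons_other (d : Char) (rest' : List Char) (hd1 : ¬d = '\\') (hd2 : ¬d = ']') :
    spl (d :: rest') = (spl rest').map fun (b, r, t) => (d :: b, d :: r, t) := by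
  rw [spl.eq_def]; simp [hd1, hd2]

lemma unesc_cons_other (d : Char) (r : List Char) (hd : ¬d = '\\') :
    unesc (d :: r) = d :: unesc r := by
  rw [unesc.eq_def]; simp [hd]

lemma lemA (tail : List Char) : ∀ br raw, goA tail false br raw =
    (spl tail).map fun (b, r, t) => (some (String.mk (br ++ b)), some (String.mk (raw ++ r)), String.mk t) := by
  induction tail using spl.induct with
  | case1 => intro br raw; simp [goA, spl_nil]
  | case2 => intro br raw; simp [goA, spl_esc_nil]
  | case3 d rest' ih =>
    intro br raw
    rw [spl_cons_esc]
    cases h : spl rest' with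
    | none => simp [goA, h, ih]
    | some v => rcases v with ⟨b, r, t⟩; simp [goA, h, ih]
  | case4 hc => intro br raw; simp [goA, spl_cons_close, hc]
  | case5 rest' hc => intro br raw; simp [goA, spl_cons_close, hc]
  | case6 d rest' hd hc => intro br raw; simp [goA, spl_cons_close, hc, hd]
  | case7 d rest' hd1 hd2 ih =>
    intro br raw
    rw [spl_cons_other d rest' hd1 hd2]
    cases h : spl rest' with
    | none => simp [goA, h, ih, hd1, hd2]
    | some v => rcases v with ⟨b, r, t⟩; simp [goA, h, ih, hd1, hd2]

lemma lemB (tail : List Char) :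
    (∀ b r t, spl tail = some (b, r, t) → tail = r ++ ']' :: ':' :: t ∧ locB tail false = some r.length ∧ b = unesc r)
    ∧ (spl tail = none → locB tail false = none ∨ ∃ j, locB tail false = some j ∧ tail[j + 1]? ≠ some ':') := by
  induction tail using spl.induct with
  | case1 => simp [spl_nil, locB]
  | case2 => simp [spl_esc_nil, locB]
  | case3 d rest' ih =>
    constructor
    · intro b r t h
      rw [spl_cons_esc, Option.map_eq_some_iff] at h
      obtain ⟨⟨b', r', t'⟩, h1, h2⟩ := h
      obtain ⟨e1, e2, e3⟩ := ih.1 b' r' t' h1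
      injection h2 with h2a h2b
      injection h2b with h2b h2c
      subst h2a h2b h2c
      refine ⟨by simp [e1], ?_, ?_⟩
      · simp [locB, e2]
      · simp [unesc, e3]
    · intro h
      rw [spl_cons_esc, Option.map_eq_none_iff] at h
      rcases ih.2 h with h' | ⟨j, hj, hne⟩
      · left; simp [locB, h']
      · right
        exact ⟨j + 2, by simp [locB, hj], by simpa using hne⟩
  | case4 hc =>
    refine ⟨by simp [spl_cons_close], fun _ => Or.inr ⟨0, by simp [locB, hc], by simp⟩⟩
  | case5 rest' hc =>
    constructor
    · intro b r t' h
      simp [spl_cons_close] at h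
      obtain ⟨h1, h2, h3⟩ := h
      subst h1 h2 h3
      exact ⟨rfl, by simp [locB, hc], by simp [unesc]⟩
    · intro h
      simp [spl_cons_close] at h
  | case6 d rest' hd hc =>
    constructor
    · intro b r t h
      simp [spl_cons_close, hd] at h
    · intro _
      exact Or.inr ⟨0, by simp [locB, hc], by simp [hd]⟩
  | case7 d rest' hd1 hd2 ih =>
    constructor
    · intro b r t h
      rw [spl_cons_other d rest' hd1 hd2, Option.map_eq_some_iff] at h
      obtain ⟨⟨b', r', t'⟩, h1, h2⟩ := h
      obtain ⟨e1, e2, e3⟩ := ih.1 b' r' t' h1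
      injection h2 with h2a h2b
      injection h2b with h2b h2c
      subst h2a h2b h2c
      refine ⟨by simp [e1], ?_, ?_⟩
      · simp [locB, hd1, hd2, e2]
      · simp [unesc_cons_other d r' hd1, e3]
    · intro h
      rw [spl_cons_other d rest' hd1 hd2, Option.map_eq_none_iff] at h
      rcases ih.2 h with h' | ⟨j, hj, hne⟩
      · left; simp [locB, hd1, hd2, h']
      · right
        exact ⟨j + 1, by simp [locB, hd1, hd2, hj], by simpa using hne⟩

lemma bCore_eq_spl (tail : List Char) : bCore tail =
    (spl tail).map fun (b, r, t) => (some (String.mk b), some (String.mk r), String.mk t) := by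
  cases h : spl tail with
  | none =>
    rcases (lemB tail).2 h with h' | ⟨j, hj, hne⟩
    · simp [bCore, h']
    · simp [bCore, hj, hne]
  | some v =>
    rcases v with ⟨b, r, t⟩
    obtain ⟨e1, e2, e3⟩ := (lemB tail).1 b r t h
    have hget : tail[r.length + 1]? = some ':' := by
      rw [e1, List.getElem?_append_right (by omega)]
      simp
    have htake : tail.take r.length = r := by
      rw [e1]; simpa using List.take_left (l₁ := r) (l₂ := ']' :: ':' :: t)
    have hdrop : tail.drop (r.length + 2) = t := by
      rw [e1, show r ++ ']' :: ':' :: t = (r ++ [']', ':']) ++ t from by simp,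
        show r.length + 2 = (r ++ [']', ':']).length from by simp]
      simpa using List.drop_left (l₁ := r ++ [']', ':']) (l₂ := t)
    simp [bCore, e2, hget, htake, hdrop, e3]

-- ===== VERDICT (by name: the statement is the Claim_ definition above) =====
theorem split_git_branch_prefix_spec : Claim_equal_split_git_branch_prefix := by
  intro body _
  unfold Spec_split_git_branch_prefix split_git_branch_prefix split_git_branch_prefix_alt
  cases h : body.toList with
  | nil => rfl
  | cons c tail =>
    by_cases hc : c = '['
    · subst hc
      show goA tail false [] [] = if ('[' : Char) = '[' then bCore tail else some (none, none, body)
      rw [if_pos rfl, lemA tail [] [], bCore_eq_spl]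
      cases hs : spl tail with
      | none => rfl
      | some v => rcases v with ⟨b, r, t⟩; simp
    · show (match c :: tail with
          | '[' :: tail => goA tail false [] []
          | _ => some (none, none, body)) = if c = '[' then bCore tail else some (none, none, body)
      rw [if_neg hc]
      split
      · rename_i heq
        injection heq with h1 _
        exact absurd h1 hc
      · rfl
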